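-- pv_equiv track=rewrite | github.com/nikhilvarshney2/GUVI | Player/set-10/99.py | bco
-- ===== SOURCE A (Python) =====
-- def bco(u):
--     if u==1 or u==0:
--         return u
--     s = 0
--     for i in range(3):
--         s += (2**i)*(u%10)
--         u = u//10
--     return s + 10*bco(u)
-- ===== SOURCE B (Python) =====
-- def bco(u):
--     # Flat single-digit loop: weight of the i-th least significant digit is
--     # (2 ** (i % 3)) * (10 ** (i // 3)); the base value (0 or 1) left when a
--     # 3-digit group boundary is reached gets the next group's place value.
--     result, i = 0, 0
--     while u > 1 or i % 3 != 0:
--         result += (2 ** (i % 3)) * (10 ** (i // 3)) * (u % 10)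
--         u //= 10
--         i += 1
--     return result + (10 ** (i // 3)) * u
-- ===== Notes on version B (the rewrite author's own statement) =====
-- stated objective: alternative
-- what changed: Replaced the 3-digits-per-recursive-call structure by a flat non-recursive loop that consumes one digit per iteration, computing each digit's weight 2**(i%3) * 10**(i//3) directly from a digit counter instead of from the call depth and an inner for-loop.
import Mathlib
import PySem

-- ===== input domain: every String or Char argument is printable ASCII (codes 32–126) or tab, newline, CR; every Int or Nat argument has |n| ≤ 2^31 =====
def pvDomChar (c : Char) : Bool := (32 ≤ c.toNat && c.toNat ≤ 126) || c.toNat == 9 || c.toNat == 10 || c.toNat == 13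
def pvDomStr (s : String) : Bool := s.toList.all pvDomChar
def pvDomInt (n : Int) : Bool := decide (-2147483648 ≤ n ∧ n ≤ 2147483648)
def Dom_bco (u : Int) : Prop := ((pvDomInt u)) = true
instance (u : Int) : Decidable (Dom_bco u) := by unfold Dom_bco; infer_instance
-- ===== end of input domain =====

-- B replaces A's 3-digits-per-recursive-call structure by a flat one-digit-per-iteration
-- loop whose weights come from a digit counter (objective: alternative; same cost).
-- On u < 0 Python A raises RecursionError; Pre_ excludes those inputs.

-- ===== PORT A =====
-- the 3-iteration digit loop of A: (s, u) after `for i in range(3): s += (2**i)*(u%10); u //= 10`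
def bcoStep (u : Int) : Int × Int :=
  [0, 1, 2].foldl
    (fun (su : Int × Int) (i : Nat) =>
      (su.1 + (2 ^ i) * PySem.Int.mod su.2 10, PySem.Int.floordiv su.2 10))
    (0, u)

-- A's recursion, fuel-bounded (u.toNat + 1 fuel suffices for all u ≥ 0, where A terminates)
def bcoGo : Nat → Int → Int
  | 0, u => u
  | Nat.succ n, u =>
    if u = 1 ∨ u = 0 then u
    else (bcoStep u).1 + 10 * bcoGo n (bcoStep u).2

def bco (u : Int) : Int := bcoGo (u.toNat + 1) u

-- ===== PORT B =====
-- Source B's while loop, fuel-bounded (3 * (u.toNat + 1) fuel suffices wherever it terminates);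
-- the digit counter i is always a nonnegative int in Python, ported as a Nat (its % and //
-- on nonnegative values agree with Python's).
def bcoAltGo : Nat → Int → Int → Nat → Int
  | 0, u, result, i => result + 10 ^ (i / 3) * u
  | Nat.succ n, u, result, i =>
    if 1 < u ∨ i % 3 ≠ 0 then
      bcoAltGo n (PySem.Int.floordiv u 10)
        (result + 2 ^ (i % 3) * 10 ^ (i / 3) * PySem.Int.mod u 10) (i + 1)
    else result + 10 ^ (i / 3) * u

def bco_alt (u : Int) : Int := bcoAltGo (3 * (u.toNat + 1)) u 0 0

-- ===== PRECONDITION & SPEC =====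
-- Python A raises RecursionError on every negative u (floor division by 10 never reaches 0 or 1 from below); Pre_ excludes exactly those.
def Pre_bco (u : Int) : Prop := 0 ≤ u
instance (u : Int) : Decidable (Pre_bco u) := by unfold Pre_bco; infer_instance
def pvWitness_bco : Int := 123456
def Spec_bco (u : Int) (out : Int) : Prop := out = bco_alt u
instance (u : Int) (out : Int) : Decidable (Spec_bco u out) := by unfold Spec_bco; infer_instance

-- ===== CLAIM (what is proved, stated in full; the proofs are below) =====
def Claim_equal_bco : Prop := ∀ (u : Int), Dom_bco u → Pre_bco u → Spec_bco u (bco u)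

-- ===== LEMMAS AND PROOFS =====

-- A's fuel is irrelevant as soon as it exceeds u.toNat
theorem bcoGo_fuel : ∀ (t : Nat) (u : Int), u.toNat = t → 0 ≤ u →
    ∀ n, u.toNat + 1 ≤ n → bcoGo n u = bcoGo (u.toNat + 1) u := by
  intro t
  induction t using Nat.strong_induction_on with
  | _ t ih =>
    intro u ht hu n hn
    obtain ⟨m, rfl⟩ : ∃ m, n = m + 1 := ⟨n - 1, by omega⟩
    by_cases hb : u = 1 ∨ u = 0
    · simp [bcoGo, hb]
    · have h2 : 2 ≤ u := by
        rcases Int.lt_or_lt_of_ne (fun h => hb (Or.inr h)) with h | h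
        · omega
        · omega
      have hstep : (bcoStep u).2 = u / 10 / 10 / 10 := by
        simp [bcoStep]
      have hu'0 : 0 ≤ u / 10 / 10 / 10 := by omega
      have hlt : (u / 10 / 10 / 10).toNat < t := by omega
      have e1 : bcoGo m (u / 10 / 10 / 10)
          = bcoGo ((u / 10 / 10 / 10).toNat + 1) (u / 10 / 10 / 10) :=
        ih _ hlt _ rfl hu'0 m (by omega)
      have e2 : bcoGo u.toNat (u / 10 / 10 / 10)
          = bcoGo ((u / 10 / 10 / 10).toNat + 1) (u / 10 / 10 / 10) :=
        ih _ hlt _ rfl hu'0 u.toNat (by omega)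
      simp only [bcoGo, if_neg hb, hstep]
      rw [e1, e2]

-- B's loop equals `result + 10^(i/3) * (A's value)` at every group boundary
theorem bcoAltGo_eq : ∀ (t : Nat) (u : Int), u.toNat = t → 0 ≤ u →
    ∀ (n : Nat) (result : Int) (i : Nat), i % 3 = 0 → 3 * (u.toNat + 1) ≤ n →
    bcoAltGo n u result i = result + 10 ^ (i / 3) * bcoGo (u.toNat + 1) u := by
  intro t
  induction t using Nat.strong_induction_on with
  | _ t ih =>
    intro u ht hu n result i hi hn
    obtain ⟨k, rfl⟩ : ∃ k, i = 3 * k := ⟨i / 3, by omega⟩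
    by_cases hb : u = 1 ∨ u = 0
    · obtain ⟨m, rfl⟩ : ∃ m, n = m + 1 := ⟨n - 1, by omega⟩
      have hc : ¬ (1 < u ∨ 3 * k % 3 ≠ 0) := by
        rintro (h | h)
        · rcases hb with rfl | rfl <;> omega
        · omega
      simp only [bcoAltGo]
      rw [if_neg hc]
      rcases hb with rfl | rfl <;> simp [bcoGo]
    · have h2 : 2 ≤ u := by
        rcases Int.lt_or_lt_of_ne (fun h => hb (Or.inr h)) with h | h
        · omega
        · omega
      have hlt1 : (1 : Int) < u := by omega
      obtain ⟨m, rfl⟩ : ∃ m, n = m + 3 := ⟨n - 3, by omega⟩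
      have hu'0 : 0 ≤ u / 10 / 10 / 10 := by omega
      have hlt : (u / 10 / 10 / 10).toNat < t := by omega
      have hf2 : (u / 10 / 10 / 10).toNat + 1 ≤ u.toNat := by omega
      -- the A side: one recursive step of bcoGo, with its fuel normalised
      have hA : bcoGo (u.toNat + 1) u
          = (u % 10 + 2 * (u / 10 % 10) + 4 * (u / 10 / 10 % 10))
            + 10 * bcoGo ((u / 10 / 10 / 10).toNat + 1) (u / 10 / 10 / 10) := by
        have hs1 : (bcoStep u).1
            = u % 10 + 2 * (u / 10 % 10) + 4 * (u / 10 / 10 % 10) := by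
          simp [bcoStep]
        have hs2 : (bcoStep u).2 = u / 10 / 10 / 10 := by
          simp [bcoStep]
        conv_lhs => rw [bcoGo]
        rw [if_neg hb, hs1, hs2, bcoGo_fuel _ _ rfl hu'0 u.toNat hf2]
      rw [hA]
      -- the B side: unfold the three loop iterations of one digit group
      have d0 : 3 * k % 3 = 0 := by omega
      have d1 : (3 * k + 1) % 3 = 1 := by omega
      have d2 : (3 * k + 1 + 1) % 3 = 2 := by omega
      have q0 : 3 * k / 3 = k := by omega
      have q1 : (3 * k + 1) / 3 = k := by omega
      have q2 : (3 * k + 1 + 1) / 3 = k := by omega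
      simp [bcoAltGo, hlt1, d0, d1, d2, q0, q1, q2]
      rw [ih _ hlt _ rfl hu'0 m _ (3 * k + 1 + 1 + 1) (by omega) (by omega)]
      have q3 : (3 * k + 1 + 1 + 1) / 3 = k + 1 := by omega
      rw [q3, pow_succ]
      ring

-- ===== VERDICT (by name: the statement is the Claim_ definition above) =====
theorem bco_spec : Claim_equal_bco := by
  intro u _ hu
  unfold Spec_bco bco bco_alt
  rw [bcoAltGo_eq u.toNat u rfl hu _ 0 0 (by omega) (by omega)]
  simp
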